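-- pv_equiv track=rewrite | github.com/shahed1475/Software-testing-Ai | src/reporting/security_reporter.py | _map_owasp_top10
-- ===== SOURCE A (Python) =====
-- from typing import Any, Dict, List, Optional, Tuple
--
-- def _map_owasp_top10(vulnerabilities: List[Dict[str, Any]]) -> Dict[str, int]:
--     """Map vulnerabilities to OWASP Top 10 categories"""
--
--     owasp_mapping = {}
--
--     for vuln in vulnerabilities:
--         category = vuln.get('category', '').lower()
--         owasp_category = None
--
--         # Map to OWASP Top 10 2021
--         if 'access_control' in category or 'authorization' in category:
--             owasp_category = 'A01'
--         elif 'crypto' in category or 'encryption' in category: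
--             owasp_category = 'A02'
--         elif 'injection' in category or 'sql' in category or 'xss' in category:
--             owasp_category = 'A03'
--         elif 'design' in category:
--             owasp_category = 'A04'
--         elif 'misconfiguration' in category or 'config' in category:
--             owasp_category = 'A05'
--         elif 'component' in category or 'dependency' in category:
--             owasp_category = 'A06'
--         elif 'authentication' in category or 'session' in category:
--             owasp_category = 'A07'
--         elif 'integrity' in category or 'deserialization' in category:
--             owasp_category = 'A08'
--         elif 'logging' in category or 'monitoring' in category:
--             owasp_category = 'A09'
--         elif 'ssrf' in category:
--             owasp_category = 'A10'
--
--         if owasp_category: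
--             owasp_mapping[owasp_category] = owasp_mapping.get(owasp_category, 0) + 1
--
--     return owasp_mapping
-- ===== SOURCE B (Python) =====
-- _KEYWORD_CODES = {
--     'access_control': 'A01', 'authorization': 'A01',
--     'crypto': 'A02', 'encryption': 'A02',
--     'injection': 'A03', 'sql': 'A03', 'xss': 'A03',
--     'design': 'A04',
--     'misconfiguration': 'A05', 'config': 'A05',
--     'component': 'A06', 'dependency': 'A06',
--     'authentication': 'A07', 'session': 'A07',
--     'integrity': 'A08', 'deserialization': 'A08',
--     'logging': 'A09', 'monitoring': 'A09',
--     'ssrf': 'A10',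
-- }
--
--
-- def _classify(category):
--     # every matching keyword's code; the OWASP codes 'A01'..'A10' sort
--     # lexicographically in exactly the priority order, so min() picks the
--     # highest-priority category instead of a first-match branch ladder
--     hits = [code for kw, code in _KEYWORD_CODES.items() if kw in category]
--     return min(hits) if hits else None
--
--
-- def _map_owasp_top10(vulnerabilities):
--     """Map vulnerabilities to OWASP Top 10 categories (classify-all, then count)."""
--     codes = [c for c in (_classify(v.get('category', '').lower()) for v in vulnerabilities)
--              if c is not None]
--     return {c: codes.count(c) for c in dict.fromkeys(codes)}
-- ===== Notes on version B (the rewrite author's own statement) =====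
-- stated objective: alternative
-- what changed: Classification becomes 'min over the codes of ALL matching keywords in a flat keyword->code dict' (correct because the OWASP codes A01..A10 sort lexicographically in exactly the ladder's priority order) instead of a first-match if/elif ladder, and counting becomes staged passes (classify everything into a list, dedup the keys, count each key with list.count) instead of incremental dict updates inside the loop.
import Mathlib
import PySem

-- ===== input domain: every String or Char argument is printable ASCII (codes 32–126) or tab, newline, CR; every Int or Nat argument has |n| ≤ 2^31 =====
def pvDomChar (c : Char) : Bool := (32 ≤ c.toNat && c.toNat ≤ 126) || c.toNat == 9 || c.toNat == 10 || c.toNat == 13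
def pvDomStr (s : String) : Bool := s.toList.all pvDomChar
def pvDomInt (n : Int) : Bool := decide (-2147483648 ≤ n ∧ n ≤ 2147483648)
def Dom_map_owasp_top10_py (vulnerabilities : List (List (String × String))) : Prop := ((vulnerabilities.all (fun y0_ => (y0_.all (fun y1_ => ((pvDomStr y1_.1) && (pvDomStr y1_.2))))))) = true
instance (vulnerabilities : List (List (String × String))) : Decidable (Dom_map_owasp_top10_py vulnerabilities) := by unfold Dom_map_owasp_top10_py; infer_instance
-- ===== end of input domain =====

-- B classifies each vulnerability to the MIN code over all matching keywords of a flat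
-- keyword→code table (the OWASP codes sort in priority order), then counts in staged
-- passes (dedup keys + list.count) instead of A's if/elif ladder with incremental dict
-- updates (objective: alternative).

-- ===== PORT A =====
-- step of A's loop: the literal if/elif ladder, then the conditional dict increment
def mapOwaspStepA (d : PySem.Dict String Int) (vuln : List (String × String)) :
    PySem.Dict String Int :=
  let category := PySem.Str.lower ((PySem.Dict.mk vuln).getD "category" "")
  let owaspCategory : Option String :=
    if PySem.Str.isIn "access_control" category || PySem.Str.isIn "authorization" category then
      some "A01"
    else if PySem.Str.isIn "crypto" category || PySem.Str.isIn "encryption" category then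
      some "A02"
    else if PySem.Str.isIn "injection" category || PySem.Str.isIn "sql" category ||
        PySem.Str.isIn "xss" category then
      some "A03"
    else if PySem.Str.isIn "design" category then
      some "A04"
    else if PySem.Str.isIn "misconfiguration" category || PySem.Str.isIn "config" category then
      some "A05"
    else if PySem.Str.isIn "component" category || PySem.Str.isIn "dependency" category then
      some "A06"
    else if PySem.Str.isIn "authentication" category || PySem.Str.isIn "session" category then
      some "A07"
    else if PySem.Str.isIn "integrity" category || PySem.Str.isIn "deserialization" category then
      some "A08"
    else if PySem.Str.isIn "logging" category || PySem.Str.isIn "monitoring" category then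
      some "A09"
    else if PySem.Str.isIn "ssrf" category then
      some "A10"
    else
      none
  match owaspCategory with
  | some c => d.insert c (d.getD c 0 + 1)
  | none => d

def map_owasp_top10_py (vulnerabilities : List (List (String × String))) : List (String × Int) :=
  (vulnerabilities.foldl mapOwaspStepA PySem.Dict.empty).items

-- ===== PORT B =====
-- the flat keyword → code dict _KEYWORD_CODES, in its (insertion) iteration order
def keywordCodes : List (String × String) :=
  [ ("access_control", "A01"), ("authorization", "A01")
  , ("crypto", "A02"), ("encryption", "A02")
  , ("injection", "A03"), ("sql", "A03"), ("xss", "A03")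
  , ("design", "A04")
  , ("misconfiguration", "A05"), ("config", "A05")
  , ("component", "A06"), ("dependency", "A06")
  , ("authentication", "A07"), ("session", "A07")
  , ("integrity", "A08"), ("deserialization", "A08")
  , ("logging", "A09"), ("monitoring", "A09")
  , ("ssrf", "A10") ]

-- _classify: the codes of all matching keywords, then 'min(hits) if hits else None'
-- (PySem.List.min? is exactly that: none on [], Python's min otherwise)
def classifyB (category : String) : Option String :=
  let hits := keywordCodes.filterMap
    (fun p => if PySem.Str.isIn p.1 category then some p.2 else none)
  PySem.List.min? hits (fun x => x)

-- the dict comprehension {c: codes.count(c) for c in dict.fromkeys(codes)}: keys are the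
-- deduped codes in first-occurrence order (PySem.List.dedup = dict.fromkeys), values codes.count
def map_owasp_top10_py_alt (vulnerabilities : List (List (String × String))) : List (String × Int) :=
  let codes := vulnerabilities.filterMap
    (fun v => classifyB (PySem.Str.lower ((PySem.Dict.mk v).getD "category" "")))
  (PySem.List.dedup codes).map (fun c => (c, (codes.count c : Int)))

-- ===== PRECONDITION & SPEC =====
def Spec_map_owasp_top10_py (vulnerabilities : List (List (String × String))) (out : List (String × Int)) : Prop := out = map_owasp_top10_py_alt vulnerabilities
instance (vulnerabilities : List (List (String × String))) (out : List (String × Int)) : Decidable (Spec_map_owasp_top10_py vulnerabilities out) := by unfold Spec_map_owasp_top10_py; infer_instance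

-- ===== CLAIM (what is proved, stated in full; the proofs are below) =====
def Claim_equal_map_owasp_top10_py : Prop := ∀ (vulnerabilities : List (List (String × String))), Dom_map_owasp_top10_py vulnerabilities → Spec_map_owasp_top10_py vulnerabilities (map_owasp_top10_py vulnerabilities)

-- ===== LEMMAS AND PROOFS =====

-- A's ladder as a function (definitionally the body of mapOwaspStepA)
def ladderClassify (category : String) : Option String :=
  if PySem.Str.isIn "access_control" category || PySem.Str.isIn "authorization" category then
    some "A01"
  else if PySem.Str.isIn "crypto" category || PySem.Str.isIn "encryption" category then
    some "A02"
  else if PySem.Str.isIn "injection" category || PySem.Str.isIn "sql" category ||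
      PySem.Str.isIn "xss" category then
    some "A03"
  else if PySem.Str.isIn "design" category then
    some "A04"
  else if PySem.Str.isIn "misconfiguration" category || PySem.Str.isIn "config" category then
    some "A05"
  else if PySem.Str.isIn "component" category || PySem.Str.isIn "dependency" category then
    some "A06"
  else if PySem.Str.isIn "authentication" category || PySem.Str.isIn "session" category then
    some "A07"
  else if PySem.Str.isIn "integrity" category || PySem.Str.isIn "deserialization" category then
    some "A08"
  else if PySem.Str.isIn "logging" category || PySem.Str.isIn "monitoring" category then
    some "A09"
  else if PySem.Str.isIn "ssrf" category then
    some "A10"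
  else
    none

-- the keyword table grouped by code, codes strictly increasing
def owaspGroups : List (List String × String) :=
  [ (["access_control", "authorization"], "A01")
  , (["crypto", "encryption"], "A02")
  , (["injection", "sql", "xss"], "A03")
  , (["design"], "A04")
  , (["misconfiguration", "config"], "A05")
  , (["component", "dependency"], "A06")
  , (["authentication", "session"], "A07")
  , (["integrity", "deserialization"], "A08")
  , (["logging", "monitoring"], "A09")
  , (["ssrf"], "A10") ]

def hitsOf (category : String) (tbl : List (String × String)) : List String :=
  tbl.filterMap (fun p => if PySem.Str.isIn p.1 category then some p.2 else none)

def findGrouped (category : String) (groups : List (List String × String)) : Option String :=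
  (groups.find? (fun r => r.1.any (fun kw => PySem.Str.isIn kw category))).map (·.2)

theorem min_eq_self_of_le (a : String) (t : List String) (h : ∀ x ∈ t, a ≤ x) :
    t.foldl min a = a := by
  rcases (PySem.List.foldl_min_mem t a) with he | hm
  · exact he
  · exact le_antisymm (PySem.List.foldl_min_le t a).1 (h _ hm)

theorem min?_group (a : String) (g rest : List String)
    (hg : ∀ x ∈ g, x = a) (hr : ∀ x ∈ rest, a ≤ x) :
    PySem.List.min? (g ++ rest) (fun x => x) =
      if g = [] then PySem.List.min? rest (fun x => x) else some a := by
  cases g with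
  | nil => simp
  | cons y g' =>
    simp only [List.cons_append, PySem.List.min?_id_cons, if_neg (List.cons_ne_nil y g')]
    have hy : y = a := hg y (by simp)
    subst hy
    congr 1
    apply min_eq_self_of_le
    intro x hx
    rcases List.mem_append.mp hx with h1 | h2
    · exact le_of_eq (hg x (by simp [h1])).symm
    · exact hr x h2

theorem mem_hitsOf {x : String} {category : String} {tbl : List (String × String)}
    (h : x ∈ hitsOf category tbl) : x ∈ tbl.map (·.2) := by
  unfold hitsOf at h
  rcases List.mem_filterMap.mp h with ⟨p, hp, hpx⟩
  split at hpx
  · cases hpx; exact List.mem_map.mpr ⟨p, hp, rfl⟩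
  · cases hpx

-- the grouped first-match classifier equals min over the flattened hits,
-- provided every later group's code is strictly larger
theorem min?_hits_grouped (category : String) (groups : List (List String × String))
    (hord : groups.Pairwise (fun g1 g2 => g1.2.toList < g2.2.toList)) :
    PySem.List.min? (hitsOf category (groups.flatMap (fun r => r.1.map (fun k => (k, r.2)))))
        (fun x => x) = findGrouped category groups := by
  induction groups with
  | nil => rfl
  | cons g gs ih =>
    have hord' := (List.pairwise_cons.mp hord)
    have hflat : hitsOf category ((g :: gs).flatMap (fun r => r.1.map (fun k => (k, r.2))))
        = hitsOf category (g.1.map (fun k => (k, g.2)))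
          ++ hitsOf category (gs.flatMap (fun r => r.1.map (fun k => (k, r.2)))) := by
      simp [hitsOf, List.flatMap_cons, List.filterMap_append]
    rw [hflat]
    rw [min?_group g.2 _ _
        (by
          intro x hx
          have hx' := mem_hitsOf hx
          simp only [List.map_map] at hx'
          rcases List.mem_map.mp hx' with ⟨k, _, hk⟩
          exact hk.symm)
        (by
          intro x hx
          have hx' := mem_hitsOf hx
          simp only [List.map_flatMap, List.map_map] at hx'
          rcases List.mem_flatMap.mp hx' with ⟨r, hr, hxr⟩
          rcases List.mem_map.mp hxr with ⟨k, _, hk⟩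
          have hlt : g.2 < r.2 := String.lt_iff_toList_lt.mpr (hord'.1 r hr)
          exact le_of_lt (hk ▸ hlt))]
    have hempty : hitsOf category (g.1.map (fun k => (k, g.2))) = []
        ↔ (g.1.any (fun kw => PySem.Str.isIn kw category)) = false := by
      simp [hitsOf, List.filterMap_eq_nil_iff]
    by_cases hm : (g.1.any (fun kw => PySem.Str.isIn kw category)) = true
    · have hne : hitsOf category (g.1.map (fun k => (k, g.2))) ≠ [] := by
        intro hc
        rw [hempty.mp hc] at hm
        exact Bool.false_ne_true hm
      rw [if_neg hne, findGrouped,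
        List.find?_cons_of_pos
          (p := fun (r : List String × String) => r.1.any (fun kw => PySem.Str.isIn kw category)) hm,
        Option.map_some]
    · have hmb : (g.1.any (fun kw => PySem.Str.isIn kw category)) = false :=
        Bool.eq_false_iff.mpr hm
      rw [if_pos (hempty.mpr hmb), ih hord'.2, findGrouped, findGrouped,
        List.find?_cons_of_neg
          (p := fun (r : List String × String) => r.1.any (fun kw => PySem.Str.isIn kw category))
          (fun h => hm h)]

-- the ladder IS the grouped first match over the literal table (case split on the 10 tests)
theorem ladder_eq_findGrouped (category : String) :
    ladderClassify category = findGrouped category owaspGroups := by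
  simp only [ladderClassify, findGrouped, owaspGroups, List.find?, List.any_cons,
    List.any_nil, Bool.or_false, Bool.or_assoc]
  generalize (PySem.Str.isIn "access_control" category || PySem.Str.isIn "authorization" category) = c1
  generalize (PySem.Str.isIn "crypto" category || PySem.Str.isIn "encryption" category) = c2
  generalize (PySem.Str.isIn "injection" category || (PySem.Str.isIn "sql" category || PySem.Str.isIn "xss" category)) = c3
  generalize (PySem.Str.isIn "design" category) = c4
  generalize (PySem.Str.isIn "misconfiguration" category || PySem.Str.isIn "config" category) = c5
  generalize (PySem.Str.isIn "component" category || PySem.Str.isIn "dependency" category) = c6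
  generalize (PySem.Str.isIn "authentication" category || PySem.Str.isIn "session" category) = c7
  generalize (PySem.Str.isIn "integrity" category || PySem.Str.isIn "deserialization" category) = c8
  generalize (PySem.Str.isIn "logging" category || PySem.Str.isIn "monitoring" category) = c9
  generalize (PySem.Str.isIn "ssrf" category) = c10
  cases c1 <;> cases c2 <;> cases c3 <;> cases c4 <;> cases c5 <;> cases c6 <;>
    cases c7 <;> cases c8 <;> cases c9 <;> cases c10 <;> rfl

theorem classifyB_eq_ladder (category : String) :
    classifyB category = ladderClassify category := by
  have hflat : keywordCodes
      = owaspGroups.flatMap (fun r => r.1.map (fun k => (k, r.2))) := by decide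
  have hord : owaspGroups.Pairwise (fun g1 g2 => g1.2.toList < g2.2.toList) := by decide
  rw [classifyB, ladder_eq_findGrouped]
  rw [show keywordCodes.filterMap
        (fun p => if PySem.Str.isIn p.1 category then some p.2 else none)
      = hitsOf category keywordCodes from rfl, hflat]
  exact min?_hits_grouped category owaspGroups hord

-- A's fold is the counting fold over the filterMapped classification results
theorem foldA_eq (vs : List (List (String × String))) (d : PySem.Dict String Int) :
    vs.foldl mapOwaspStepA d
      = (vs.filterMap
          (fun v => ladderClassify (PySem.Str.lower ((PySem.Dict.mk v).getD "category" "")))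
        ).foldl (fun d c => d.insert c (d.getD c 0 + 1)) d := by
  induction vs generalizing d with
  | nil => rfl
  | cons v t ih =>
    simp only [List.foldl_cons, List.filterMap_cons]
    have hstep : mapOwaspStepA d v
        = match ladderClassify (PySem.Str.lower ((PySem.Dict.mk v).getD "category" "")) with
          | some c => d.insert c (d.getD c 0 + 1)
          | none => d := rfl
    cases h : ladderClassify (PySem.Str.lower ((PySem.Dict.mk v).getD "category" "")) with
    | none => rw [hstep, h]; exact ih d
    | some c => rw [hstep, h]; exact ih _

-- ===== VERDICT (by name: the statement is the Claim_ definition above) =====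
theorem map_owasp_top10_py_spec : Claim_equal_map_owasp_top10_py := by
  intro vulnerabilities _
  unfold Spec_map_owasp_top10_py map_owasp_top10_py map_owasp_top10_py_alt
  rw [foldA_eq, PySem.Dict.foldl_insert_getD_add_one_eq_counter, PySem.Dict.items_counter]
  simp only [classifyB_eq_ladder, PySem.List.dedup_eq_ofList]
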